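-- pv_equiv track=rewrite | github.com/lazareaya/MyProject | planning/management/commands/generate_planning.py | subtract_exceptional_unavailability
-- ===== SOURCE A (Python) =====
-- def subtract_exceptional_unavailability(intervals, exceptions):
--     """
--     Soustrait les indisponibilités exceptionnelles (exceptions) d'une liste d'intervalles (intervals).
--     intervals: liste de (datetime_debut, datetime_fin)
--     exceptions: liste de (datetime_debut, datetime_fin) à soustraire
--     Retourne une nouvelle liste d'intervalles actifs.
--     """
--     result = []
--     for interval in intervals:
--         interval_start, interval_end = interval
--         sub_intervals = [(interval_start, interval_end)]
--         for exc_start, exc_end in exceptions: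
--             new_subs = []
--             for (sub_start, sub_end) in sub_intervals:
--                 # Si l'indispo ne recouvre pas du tout ce sous-intervalle
--                 if exc_end <= sub_start or exc_start >= sub_end:
--                     new_subs.append((sub_start, sub_end))
--                 else:
--                     # Découpe éventuelle
--                     if sub_start < exc_start:
--                         new_subs.append((sub_start, exc_start))
--                     if sub_end > exc_end:
--                         new_subs.append((exc_end, sub_end))
--             sub_intervals = new_subs
--         result.extend(sub_intervals)
--     # On enlève les potentiels vides
--     result = [(s, e) for (s, e) in result if e > s]
--     return result
-- ===== SOURCE B (Python) =====
-- def subtract_exceptional_unavailability(intervals, exceptions):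
--     # Depth-first worklist: each pending piece carries the exceptions still to be
--     # applied to it; empty pieces are dropped at the leaf (no final filtering pass).
--     out = []
--     for s0, e0 in intervals:
--         stack = [(s0, e0, exceptions)]
--         while stack:
--             s, e, excs = stack.pop()
--             if not excs:
--                 if e > s:
--                     out.append((s, e))
--                 continue
--             (a, b), rest = excs[0], excs[1:]
--             if b <= s or a >= e:
--                 stack.append((s, e, rest))
--             else:
--                 if e > b:
--                     stack.append((b, e, rest))
--                 if s < a:
--                     stack.append((s, a, rest))
--     return out
-- ===== Notes on version B (the rewrite author's own statement) =====
-- stated objective: alternative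
-- what changed: Replaces A's three nested loops that repeatedly rebuild the whole sub-interval list per exception (plus a final emptiness filter) with a depth-first explicit-stack worklist in which each pending piece carries its own remaining exception suffix and empty pieces are dropped at the leaf.
import Mathlib
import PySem

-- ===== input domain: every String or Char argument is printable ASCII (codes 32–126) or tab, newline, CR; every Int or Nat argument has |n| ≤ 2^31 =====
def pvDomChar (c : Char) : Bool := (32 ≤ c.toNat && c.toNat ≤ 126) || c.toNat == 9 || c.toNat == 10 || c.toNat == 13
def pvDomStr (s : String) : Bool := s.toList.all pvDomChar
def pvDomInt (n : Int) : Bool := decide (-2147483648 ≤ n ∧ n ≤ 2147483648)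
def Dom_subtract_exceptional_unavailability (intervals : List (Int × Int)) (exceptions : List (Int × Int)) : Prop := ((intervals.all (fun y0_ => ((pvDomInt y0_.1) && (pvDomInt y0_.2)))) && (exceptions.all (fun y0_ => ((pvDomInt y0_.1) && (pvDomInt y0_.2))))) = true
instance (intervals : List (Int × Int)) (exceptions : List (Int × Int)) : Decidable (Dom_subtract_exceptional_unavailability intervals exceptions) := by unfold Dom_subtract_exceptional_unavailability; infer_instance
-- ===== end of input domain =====

-- B replaces A's three nested rebuild-the-piece-list loops (with a final emptiness filter)
-- by a depth-first worklist in which each pending piece carries its remaining exceptions;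
-- empty pieces are dropped at the leaf. Objective: alternative decomposition, same cost.

-- ===== PORT A =====
def subtract_exceptional_unavailability (intervals : List (Int × Int)) (exceptions : List (Int × Int)) : List (Int × Int) :=
  let result :=
    intervals.foldl (fun result interval =>
      let sub_intervals : List (Int × Int) := [(interval.1, interval.2)]
      let sub_intervals :=
        exceptions.foldl (fun sub_intervals exc =>
          sub_intervals.foldl (fun new_subs sub =>
            if exc.2 ≤ sub.1 ∨ exc.1 ≥ sub.2 then
              new_subs ++ [(sub.1, sub.2)]
            else
              let new_subs := if sub.1 < exc.1 then new_subs ++ [(sub.1, exc.1)] else new_subs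
              if sub.2 > exc.2 then new_subs ++ [(exc.2, sub.2)] else new_subs) []) sub_intervals
      result ++ sub_intervals) []
  result.filter (fun p => p.2 > p.1)

-- ===== PORT B =====
-- B's while-loop over the explicit stack (top of stack = head of list).
def pvLoopB : List (Int × Int × List (Int × Int)) → List (Int × Int) → List (Int × Int)
  | [], out => out
  | (s, e, []) :: stack, out => pvLoopB stack (if e > s then out ++ [(s, e)] else out)
  | (s, e, (a, b) :: rest) :: stack, out =>
    if b ≤ s ∨ a ≥ e then pvLoopB ((s, e, rest) :: stack) out
    else
      pvLoopB ((if s < a then [(s, a, rest)] else []) ++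
               (if e > b then [(b, e, rest)] else []) ++ stack) out
termination_by stack _ => (stack.map (fun t => 3 ^ t.2.2.length)).sum
decreasing_by
  all_goals simp [Nat.pow_succ]
  have h1 : 0 < 3 ^ rest.length := by positivity
  split <;> split <;> first | omega | (simp; omega) | simp

def subtract_exceptional_unavailability_alt (intervals : List (Int × Int)) (exceptions : List (Int × Int)) : List (Int × Int) :=
  intervals.foldl (fun out p => pvLoopB [(p.1, p.2, exceptions)] out) []

-- ===== PRECONDITION & SPEC =====
def Spec_subtract_exceptional_unavailability (intervals : List (Int × Int)) (exceptions : List (Int × Int)) (out : List (Int × Int)) : Prop := out = subtract_exceptional_unavailability_alt intervals exceptions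
instance (intervals : List (Int × Int)) (exceptions : List (Int × Int)) (out : List (Int × Int)) : Decidable (Spec_subtract_exceptional_unavailability intervals exceptions out) := by unfold Spec_subtract_exceptional_unavailability; infer_instance

-- ===== CLAIM (what is proved, stated in full; the proofs are below) =====
def Claim_equal_subtract_exceptional_unavailability : Prop := ∀ (intervals : List (Int × Int)) (exceptions : List (Int × Int)), Dom_subtract_exceptional_unavailability intervals exceptions → Spec_subtract_exceptional_unavailability intervals exceptions (subtract_exceptional_unavailability intervals exceptions)

-- ===== LEMMAS AND PROOFS =====

-- Common characterisation: the ordered list of pieces produced from one piece (s,e)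
-- after applying a list of exceptions depth-first, empty pieces removed.
def pvClip (s e : Int) : List (Int × Int) → List (Int × Int)
  | [] => if e > s then [(s, e)] else []
  | (a, b) :: rest =>
    if b ≤ s ∨ a ≥ e then pvClip s e rest
    else (if s < a then pvClip s a rest else []) ++ (if e > b then pvClip b e rest else [])

-- B's stack loop computes out ++ the clips of the stack entries in order.
theorem pvLoopB_eq (stack : List (Int × Int × List (Int × Int))) (out : List (Int × Int)) :
    pvLoopB stack out = out ++ stack.flatMap (fun t => pvClip t.1 t.2.1 t.2.2) := by
  induction stack, out using pvLoopB.induct with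
  | case1 out => simp [pvLoopB]
  | case2 s e stack out ih =>
    simp only [dite_eq_ite] at ih
    rw [pvLoopB, ih]; simp [pvClip]; split <;> simp
  | case3 s e a b rest stack out h ih =>
    rw [pvLoopB, if_pos h, ih]; simp [pvClip, if_pos h]
  | case4 s e a b rest stack out h ih =>
    simp only [dite_eq_ite] at ih
    rw [pvLoopB, if_neg h, ih]
    split <;> split <;> rename_i h1 h2 <;> simp [pvClip, if_neg h, h1, h2]

-- A's inner loop over the current pieces: one exception applied to each piece.
def pvSplit (exc : Int × Int) (sub : Int × Int) : List (Int × Int) :=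
  if exc.2 ≤ sub.1 ∨ exc.1 ≥ sub.2 then [(sub.1, sub.2)]
  else (if sub.1 < exc.1 then [(sub.1, exc.1)] else []) ++
       (if sub.2 > exc.2 then [(exc.2, sub.2)] else [])

theorem pvInner_eq (exc : Int × Int) (subs : List (Int × Int)) (acc : List (Int × Int)) :
    subs.foldl (fun new_subs sub =>
      if exc.2 ≤ sub.1 ∨ exc.1 ≥ sub.2 then
        new_subs ++ [(sub.1, sub.2)]
      else
        let new_subs := if sub.1 < exc.1 then new_subs ++ [(sub.1, exc.1)] else new_subs
        if sub.2 > exc.2 then new_subs ++ [(exc.2, sub.2)] else new_subs) acc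
    = acc ++ subs.flatMap (pvSplit exc) := by
  induction subs generalizing acc with
  | nil => simp
  | cons sub subs ih =>
    rw [List.foldl_cons, ih, List.flatMap_cons]
    simp only [pvSplit]
    split_ifs <;> simp

-- The filtered result of A's fold over exceptions is the clip of each starting piece.
theorem pvFoldA_eq (excs : List (Int × Int)) (subs : List (Int × Int)) :
    (excs.foldl (fun sub_intervals exc =>
        sub_intervals.foldl (fun new_subs sub =>
          if exc.2 ≤ sub.1 ∨ exc.1 ≥ sub.2 then
            new_subs ++ [(sub.1, sub.2)]
          else
            let new_subs := if sub.1 < exc.1 then new_subs ++ [(sub.1, exc.1)] else new_subs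
            if sub.2 > exc.2 then new_subs ++ [(exc.2, sub.2)] else new_subs) []) subs).filter
      (fun p => p.2 > p.1)
    = subs.flatMap (fun p => pvClip p.1 p.2 excs) := by
  induction excs generalizing subs with
  | nil =>
    induction subs with
    | nil => simp
    | cons p subs ih =>
      rw [List.foldl_nil] at ih ⊢
      rw [List.flatMap_cons, List.filter_cons, ← ih]
      simp only [pvClip]
      split <;> rename_i h <;> simp at h <;> simp [h]
  | cons exc rest ih =>
    rw [List.foldl_cons, pvInner_eq, List.nil_append, ih, List.flatMap_assoc]
    congr 1
    funext p
    simp only [pvSplit, pvClip]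
    split_ifs <;> simp

-- ===== VERDICT (by name: the statement is the Claim_ definition above) =====
theorem subtract_exceptional_unavailability_spec : Claim_equal_subtract_exceptional_unavailability := by
  intro intervals exceptions _
  unfold Spec_subtract_exceptional_unavailability
  unfold subtract_exceptional_unavailability subtract_exceptional_unavailability_alt
  have hB : (fun (out : List (Int × Int)) (p : Int × Int) => pvLoopB [(p.1, p.2, exceptions)] out)
      = fun out p => out ++ pvClip p.1 p.2 exceptions := by
    funext out p; rw [pvLoopB_eq]; simp
  rw [hB, PySem.List.foldl_append_eq_flatMap, PySem.List.foldl_append_eq_flatMap]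
  rw [List.nil_append, List.nil_append, List.filter_flatMap]
  congr 1
  funext interval
  rw [pvFoldA_eq]
  simp
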